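-- pv_equiv track=rewrite | github.com/kenstott/provisa | provisa/cypher/label_map.py | _resolve_id_column
-- ===== SOURCE A (Python) =====
-- _ID_EXACT = {"id", "_id", "pk", "oid"}
--
-- _ID_SUFFIX = ("_id", "_pk", "_oid")
--
-- _ID_PREFIX = ("id_",)
--
-- def _resolve_id_column(
--     type_name: str,
--     col_names: list[str],
--     target_pk: dict[str, str],
--     user_pks: list[str] | None = None,
-- ) -> str:
--     """Return the primary-key column name for a node type.
--
--     Resolution order (first match wins):
--     0. User-designated PK columns (first entry if multiple).
--     1. The column named in a JoinMeta.target_column for this type — explicit FK target.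
--     2. Exact match against known id names: id, _id, pk, oid.
--     3. Single column ending in _id / _pk / _oid (unambiguous).
--     4. Single column starting with id_.
--     5. First column in the column list.
--     6. Fallback: "id".
--     """
--     # 0. User-designated PK
--     if user_pks:
--         return user_pks[0]
--
--     # 1. Explicit join target
--     if type_name in target_pk:
--         return target_pk[type_name]
--
--     # 2. Exact known names (preserve declaration order)
--     for col in col_names:
--         if col.lower() in _ID_EXACT:
--             return col
--
--     # 3. Unambiguous suffix match
--     suffix_matches = [c for c in col_names if c.lower().endswith(_ID_SUFFIX)]
--     if len(suffix_matches) == 1: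
--         return suffix_matches[0]
--
--     # 4. Unambiguous prefix match
--     prefix_matches = [c for c in col_names if c.lower().startswith(_ID_PREFIX)]
--     if len(prefix_matches) == 1:
--         return prefix_matches[0]
--
--     # 5. First column
--     if col_names:
--         return col_names[0]
--
--     # 6. Hard fallback
--     return "id"
-- ===== SOURCE B (Python) =====
-- _ID_EXACT = {"id", "_id", "pk", "oid"}
-- _ID_SUFFIX = ("_id", "_pk", "_oid")
-- _ID_PREFIX = ("id_",)
--
-- def _resolve_id_column(type_name, col_names, target_pk, user_pks=None):
--     if user_pks:
--         return user_pks[0]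
--     if type_name in target_pk:
--         return target_pk[type_name]
--     # score-and-argmin: each column gets a numeric rank, the column with the
--     # smallest rank wins (Python's min keeps the first minimal element).
--     lows = [c.lower() for c in col_names]
--     suf_unique = sum(l.endswith(_ID_SUFFIX) for l in lows) == 1
--     pre_unique = sum(l.startswith(_ID_PREFIX) for l in lows) == 1
--     def rank(col):
--         low = col.lower()
--         if low in _ID_EXACT:
--             return 0
--         if suf_unique and low.endswith(_ID_SUFFIX):
--             return 1
--         if pre_unique and low.startswith(_ID_PREFIX):
--             return 2
--         return 3
--     return min(col_names, key=rank, default="id")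
-- ===== Notes on version B (the rewrite author's own statement) =====
-- stated objective: alternative
-- what changed: Replaces A's prioritized early-return chain (exact-match scan, then a suffix comprehension, then a prefix comprehension, then head) by a score-and-argmin formulation: every column is assigned a numeric rank (0 exact, 1 sole suffix match, 2 sole prefix match, 3 other) and the answer is min(col_names, key=rank, default='id'), relying on Python's min keeping the first minimal element.
import Mathlib
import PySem

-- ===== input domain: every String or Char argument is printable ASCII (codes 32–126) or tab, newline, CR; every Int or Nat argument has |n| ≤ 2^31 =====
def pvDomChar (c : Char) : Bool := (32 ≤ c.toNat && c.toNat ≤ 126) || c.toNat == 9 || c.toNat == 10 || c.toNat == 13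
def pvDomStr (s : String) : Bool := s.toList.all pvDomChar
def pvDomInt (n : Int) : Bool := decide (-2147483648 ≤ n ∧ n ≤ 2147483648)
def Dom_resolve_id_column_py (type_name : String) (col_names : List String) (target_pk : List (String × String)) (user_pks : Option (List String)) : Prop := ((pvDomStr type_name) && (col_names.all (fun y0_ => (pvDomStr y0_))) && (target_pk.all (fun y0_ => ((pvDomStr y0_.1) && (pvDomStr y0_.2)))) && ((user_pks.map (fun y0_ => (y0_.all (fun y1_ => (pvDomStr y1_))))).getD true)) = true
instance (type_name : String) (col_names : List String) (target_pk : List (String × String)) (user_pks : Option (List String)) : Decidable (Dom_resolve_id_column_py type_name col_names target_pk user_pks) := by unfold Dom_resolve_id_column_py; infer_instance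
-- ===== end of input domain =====

-- B replaces A's prioritized early-return chain by a score-and-argmin formulation:
-- each column gets a numeric rank (0 exact, 1 sole suffix, 2 sole prefix, 3 other)
-- and the answer is min(col_names, key=rank, default="id"); same result, different algorithm.


-- shared helpers: the module constants _ID_EXACT / _ID_SUFFIX / _ID_PREFIX as predicates
def pvIsExact (low : String) : Bool := low == "id" || low == "_id" || low == "pk" || low == "oid"
def pvIsSuf (low : String) : Bool :=
  PySem.Str.endswith low "_id" || PySem.Str.endswith low "_pk" || PySem.Str.endswith low "_oid"
def pvIsPre (low : String) : Bool := PySem.Str.startswith low "id_"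
-- dict membership + lookup (first match in the association list)
def pvDictGet? (d : List (String × String)) (k : String) : Option String :=
  (d.find? (fun p => p.1 == k)).map (·.2)

-- ===== PORT A =====
-- step 2: the early-return for-loop over col_names
def pvFindExactA : List String → Option String
  | [] => none
  | c :: rest => if pvIsExact (PySem.Str.lower c) then some c else pvFindExactA rest

def resolve_id_column_py (type_name : String) (col_names : List String) (target_pk : List (String × String)) (user_pks : Option (List String)) : String :=
  match user_pks with
  | some (u :: _) => u
  | _ =>
    match pvDictGet? target_pk type_name with
    | some v => v
    | none =>
      match pvFindExactA col_names with
      | some c => c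
      | none =>
        let suffix_matches := col_names.filter (fun c => pvIsSuf (PySem.Str.lower c))
        if suffix_matches.length == 1 then suffix_matches[0]! else
        let prefix_matches := col_names.filter (fun c => pvIsPre (PySem.Str.lower c))
        if prefix_matches.length == 1 then prefix_matches[0]! else
        match col_names with
        | c :: _ => c
        | [] => "id"

-- ===== PORT B =====
-- Source B's rank closure: 0 exact, 1 suffix (when unique), 2 prefix (when unique), 3 other
def pvRankB (suf_unique pre_unique : Bool) (col : String) : Nat :=
  let low := PySem.Str.lower col
  if pvIsExact low then 0
  else if suf_unique && pvIsSuf low then 1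
  else if pre_unique && pvIsPre low then 2
  else 3

def resolve_id_column_py_alt (type_name : String) (col_names : List String) (target_pk : List (String × String)) (user_pks : Option (List String)) : String :=
  let fromRanks :=
    let lows := col_names.map PySem.Str.lower
    let suf_unique := (lows.map (fun l => if pvIsSuf l then (1 : Int) else 0)).sum == 1
    let pre_unique := (lows.map (fun l => if pvIsPre l then (1 : Int) else 0)).sum == 1
    PySem.List.minD col_names (pvRankB suf_unique pre_unique) "id"
  (user_pks.getD []).head?.getD ((pvDictGet? target_pk type_name).getD fromRanks)

-- ===== PRECONDITION & SPEC =====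
def Spec_resolve_id_column_py (type_name : String) (col_names : List String) (target_pk : List (String × String)) (user_pks : Option (List String)) (out : String) : Prop := out = resolve_id_column_py_alt type_name col_names target_pk user_pks
instance (type_name : String) (col_names : List String) (target_pk : List (String × String)) (user_pks : Option (List String)) (out : String) : Decidable (Spec_resolve_id_column_py type_name col_names target_pk user_pks out) := by unfold Spec_resolve_id_column_py; infer_instance

-- ===== CLAIM (what is proved, stated in full; the proofs are below) =====
def Claim_equal_resolve_id_column_py : Prop := ∀ (type_name : String) (col_names : List String) (target_pk : List (String × String)) (user_pks : Option (List String)), Dom_resolve_id_column_py type_name col_names target_pk user_pks → Spec_resolve_id_column_py type_name col_names target_pk user_pks (resolve_id_column_py type_name col_names target_pk user_pks)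

-- ===== LEMMAS AND PROOFS =====

-- one step of the running-min fold inside min?
theorem pv_min?_cons_cons {key : String → Nat} (a b : String) (xs : List String) :
    PySem.List.min? (a :: b :: xs) key
      = PySem.List.min? ((if key b < key a then b else a) :: xs) key := by
  by_cases h : key b < key a <;> simp [PySem.List.min?, h]

-- the running min stays at the head when nothing later beats it
theorem pv_min?_keep {key : String → Nat} (m : String) (xs : List String)
    (h : ∀ y ∈ xs, ¬ key y < key m) :
    PySem.List.min? (m :: xs) key = some m := by
  induction xs with
  | nil => rfl
  | cons x rest ih =>
    rw [pv_min?_cons_cons, if_neg (h x (by simp))]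
    exact ih (fun y hy => h y (by simp [hy]))

-- from any head m with key c < key m, the running min reaches c and stays there
theorem pv_min?_reach {key : String → Nat} (m c : String) (pre post : List String)
    (hm : key c < key m) (hpre : ∀ y ∈ pre, key c < key y)
    (hpost : ∀ y ∈ post, ¬ key y < key c) :
    PySem.List.min? (m :: (pre ++ c :: post)) key = some c := by
  induction pre generalizing m with
  | nil =>
    rw [List.nil_append, pv_min?_cons_cons, if_pos hm]
    exact pv_min?_keep c post hpost
  | cons p pre' ih =>
    rw [List.cons_append, pv_min?_cons_cons]
    by_cases hp : key p < key m
    · rw [if_pos hp]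
      exact ih p (hpre p (by simp)) (fun y hy => hpre y (by simp [hy]))
    · rw [if_neg hp]
      exact ih m hm (fun y hy => hpre y (by simp [hy]))

-- min? picks the first element whose key beats everything before it and is not beaten after
theorem pv_min?_split {key : String → Nat} (c : String) (pre post : List String)
    (hpre : ∀ y ∈ pre, key c < key y) (hpost : ∀ y ∈ post, ¬ key y < key c) :
    PySem.List.min? (pre ++ c :: post) key = some c := by
  cases pre with
  | nil => exact pv_min?_keep c post hpost
  | cons p pre' =>
    exact pv_min?_reach p c pre' post (hpre p (by simp)) (fun y hy => hpre y (by simp [hy])) hpost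

-- A's early-return scan decomposes the list at the first exact match
theorem pv_findExact_some (xs : List String) (c : String) (h : pvFindExactA xs = some c) :
    ∃ pre post, xs = pre ++ c :: post ∧ (∀ y ∈ pre, pvIsExact (PySem.Str.lower y) = false) ∧
      pvIsExact (PySem.Str.lower c) = true := by
  induction xs with
  | nil => simp [pvFindExactA] at h
  | cons x rest ih =>
    by_cases hx : pvIsExact (PySem.Str.lower x) = true
    · simp [pvFindExactA, hx] at h
      exact ⟨[], rest, by simp [h], by simp, h ▸ hx⟩
    · simp only [Bool.not_eq_true] at hx
      simp [pvFindExactA, hx] at h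
      obtain ⟨pre, post, hxs, hpre, hc⟩ := ih h
      exact ⟨x :: pre, post, by simp [hxs], by
        intro y hy; rcases List.mem_cons.mp hy with h' | h'
        · exact h' ▸ hx
        · exact hpre y h', hc⟩

theorem pv_findExact_none (xs : List String) (h : pvFindExactA xs = none) :
    ∀ y ∈ xs, pvIsExact (PySem.Str.lower y) = false := by
  induction xs with
  | nil => simp
  | cons x rest ih =>
    by_cases hx : pvIsExact (PySem.Str.lower x) = true
    · simp [pvFindExactA, hx] at h
    · simp only [Bool.not_eq_true] at hx
      simp [pvFindExactA, hx] at h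
      intro y hy; rcases List.mem_cons.mp hy with h' | h'
      · exact h' ▸ hx
      · exact ih h y h'

-- a filter with exactly one survivor decomposes the list around it
theorem pv_filter_singleton (p : String → Bool) (xs : List String) (c : String)
    (h : xs.filter p = [c]) :
    ∃ pre post, xs = pre ++ c :: post ∧ (∀ y ∈ pre, p y = false) ∧
      (∀ y ∈ post, p y = false) ∧ p c = true := by
  induction xs with
  | nil => simp at h
  | cons x rest ih =>
    by_cases hx : p x = true
    · rw [List.filter_cons_of_pos hx] at h
      have hxc : x = c := by simpa using congrArg (·.headD "") h
      have hrest : rest.filter p = [] := by simpa [hxc] using congrArg List.tail h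
      refine ⟨[], rest, by simp [hxc], by simp, ?_, hxc ▸ hx⟩
      intro y hy
      by_contra hpy
      have : y ∈ rest.filter p := List.mem_filter.mpr ⟨hy, by simpa using hpy⟩
      simp [hrest] at this
    · simp only [Bool.not_eq_true] at hx
      rw [List.filter_cons_of_neg (by simp [hx])] at h
      obtain ⟨pre, post, hxs, hpre, hpost, hc⟩ := ih h
      exact ⟨x :: pre, post, by simp [hxs], by
        intro y hy; rcases List.mem_cons.mp hy with h' | h'
        · exact h' ▸ hx
        · exact hpre y h', hpost, hc⟩

-- the 0/1 indicator sum over the lowered list counts the filtered columns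
theorem pv_sum_indicator (p : String → Bool) (xs : List String) :
    ((xs.map PySem.Str.lower).map (fun l => if p l then (1 : Int) else 0)).sum
      = ((xs.filter (fun c => p (PySem.Str.lower c))).length : Int) := by
  induction xs with
  | nil => rfl
  | cons x rest ih =>
    rw [List.map_cons, List.map_cons, List.sum_cons, ih, List.filter_cons]
    by_cases hx : p (PySem.Str.lower x) = true <;> (simp [hx]; try omega)

-- a filter of length one IS a singleton of its head
theorem pv_len_one (xs : List String) (h : xs.length = 1) : xs = [xs.headD ""] := by
  cases xs with
  | nil => simp at h
  | cons a t => cases t with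
    | nil => rfl
    | cons b t' => simp at h

-- pointwise evaluations of the rank function
theorem pvRankB_exact (s p : Bool) (c : String) (h : pvIsExact (PySem.Str.lower c) = true) :
    pvRankB s p c = 0 := by simp [pvRankB, h]

theorem pvRankB_pos (s p : Bool) (y : String) (h : pvIsExact (PySem.Str.lower y) = false) :
    0 < pvRankB s p y := by
  simp only [pvRankB, h, Bool.false_eq_true, if_false]
  split_ifs <;> omega

theorem pvRankB_suf (p : Bool) (c : String) (h1 : pvIsExact (PySem.Str.lower c) = false)
    (h2 : pvIsSuf (PySem.Str.lower c) = true) : pvRankB true p c = 1 := by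
  simp [pvRankB, h1, h2]

theorem pvRankB_gt_one (s p : Bool) (y : String) (h1 : pvIsExact (PySem.Str.lower y) = false)
    (h2 : pvIsSuf (PySem.Str.lower y) = false) : 1 < pvRankB s p y := by
  simp only [pvRankB, h1, h2, Bool.false_eq_true, Bool.and_false, if_false]
  split_ifs <;> omega

theorem pvRankB_pre (s : Bool) (c : String) (h1 : pvIsExact (PySem.Str.lower c) = false)
    (hs : s = false) (h3 : pvIsPre (PySem.Str.lower c) = true) : pvRankB s true c = 2 := by
  simp [pvRankB, h1, hs, h3]

theorem pvRankB_no_pre (s p : Bool) (y : String) (h1 : pvIsExact (PySem.Str.lower y) = false)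
    (hs : s = false) (h3 : pvIsPre (PySem.Str.lower y) = false) : pvRankB s p y = 3 := by
  simp [pvRankB, h1, hs, h3]

theorem pvRankB_ff (y : String) (h1 : pvIsExact (PySem.Str.lower y) = false) :
    pvRankB false false y = 3 := by simp [pvRankB, h1]

-- ===== VERDICT (by name: the statement is the Claim_ definition above) =====
theorem resolve_id_column_py_spec : Claim_equal_resolve_id_column_py := by
  intro type_name col_names target_pk user_pks _
  show resolve_id_column_py _ _ _ _ = resolve_id_column_py_alt _ _ _ _
  unfold resolve_id_column_py resolve_id_column_py_alt
  rcases user_pks with _ | (_ | ⟨u, us⟩) <;> try rfl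
  all_goals cases hd : pvDictGet? target_pk type_name <;> try rfl
  all_goals simp only [pv_sum_indicator]
  all_goals {
    cases hex : pvFindExactA col_names with
    | some c =>
      obtain ⟨pre, post, hxs, hpre, hc⟩ := pv_findExact_some col_names c hex
      have hmin := pv_min?_split (key := pvRankB
          ((((col_names.filter (fun c => pvIsSuf (PySem.Str.lower c))).length : Int)) == 1)
          ((((col_names.filter (fun c => pvIsPre (PySem.Str.lower c))).length : Int)) == 1))
        c pre post
        (fun y hy => by rw [pvRankB_exact _ _ c hc]; exact pvRankB_pos _ _ y (hpre y hy))
        (fun y _ => by rw [pvRankB_exact _ _ c hc]; exact Nat.not_lt_zero _)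
      rw [← hxs] at hmin
      simp [PySem.List.minD, hmin]
    | none =>
      have hnoex := pv_findExact_none col_names hex
      by_cases hs : (col_names.filter (fun c => pvIsSuf (PySem.Str.lower c))).length = 1
      · -- unique suffix match
        have hfilt : col_names.filter (fun c => pvIsSuf (PySem.Str.lower c))
            = [(col_names.filter (fun c => pvIsSuf (PySem.Str.lower c))).headD ""] :=
          pv_len_one _ hs
        set c0 := (col_names.filter (fun c => pvIsSuf (PySem.Str.lower c))).headD "" with hc0
        obtain ⟨pre, post, hxs, hpre, hpost, hc⟩ := pv_filter_singleton _ col_names c0 hfilt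
        have hc0mem : c0 ∈ col_names := by rw [hxs]; simp
        have hsB : ((((col_names.filter (fun c => pvIsSuf (PySem.Str.lower c))).length : Int)) == 1)
            = true := by simp [hs]
        have hmin := pv_min?_split (key := pvRankB true
            ((((col_names.filter (fun c => pvIsPre (PySem.Str.lower c))).length : Int)) == 1))
          c0 pre post
          (fun y hy => by
            rw [pvRankB_suf _ c0 (hnoex c0 hc0mem) hc]
            exact pvRankB_gt_one _ _ y (hnoex y (by rw [hxs]; simp [hy])) (hpre y hy))
          (fun y hy => by
            rw [pvRankB_suf _ c0 (hnoex c0 hc0mem) hc]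
            have := pvRankB_pos true
              ((((col_names.filter (fun c => pvIsPre (PySem.Str.lower c))).length : Int)) == 1)
              y (hnoex y (by rw [hxs]; simp [hy]))
            omega)
        rw [← hxs] at hmin
        simp [hfilt, PySem.List.minD, hmin]
      · -- suffix ambiguous or absent
        have hsB : ((((col_names.filter (fun c => pvIsSuf (PySem.Str.lower c))).length : Int)) == 1)
            = false := by simp; omega
        by_cases hp : (col_names.filter (fun c => pvIsPre (PySem.Str.lower c))).length = 1
        · -- unique prefix match
          have hfilt : col_names.filter (fun c => pvIsPre (PySem.Str.lower c))
              = [(col_names.filter (fun c => pvIsPre (PySem.Str.lower c))).headD ""] :=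
            pv_len_one _ hp
          set c0 := (col_names.filter (fun c => pvIsPre (PySem.Str.lower c))).headD "" with hc0
          obtain ⟨pre, post, hxs, hpre, hpost, hc⟩ := pv_filter_singleton _ col_names c0 hfilt
          have hc0mem : c0 ∈ col_names := by rw [hxs]; simp
          have hpB : ((((col_names.filter (fun c => pvIsPre (PySem.Str.lower c))).length : Int)) == 1)
              = true := by simp [hp]
          rw [hpB]
          have hmin := pv_min?_split (key := pvRankB
              ((((col_names.filter (fun c => pvIsSuf (PySem.Str.lower c))).length : Int)) == 1) true)
            c0 pre post
            (fun y hy => by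
              rw [pvRankB_pre _ c0 (hnoex c0 hc0mem) hsB hc,
                pvRankB_no_pre _ _ y (hnoex y (by rw [hxs]; simp [hy])) hsB (hpre y hy)]
              omega)
            (fun y hy => by
              rw [pvRankB_pre _ c0 (hnoex c0 hc0mem) hsB hc,
                pvRankB_no_pre _ _ y (hnoex y (by rw [hxs]; simp [hy])) hsB (hpost y hy)]
              omega)
          rw [← hxs] at hmin
          simp [hs, hfilt, PySem.List.minD, hmin]
        · -- fallback: every rank is 3, the running min keeps the head
          have hpB : ((((col_names.filter (fun c => pvIsPre (PySem.Str.lower c))).length : Int)) == 1)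
              = false := by simp; omega
          rw [hsB, hpB]
          rcases col_names with _ | ⟨x, rest⟩
          · simp [PySem.List.minD, PySem.List.min?]
          · have hmin := pv_min?_keep (key := pvRankB false false) x rest
              (fun y hy => by
                rw [pvRankB_ff y (hnoex y (by simp [hy])), pvRankB_ff x (hnoex x (by simp))]
                omega)
            simp [hs, hp, PySem.List.minD, hmin]
  }
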